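-- pv_equiv track=rewrite | github.com/ConderShou/myhub | Python/Notes/Week 2/HW2.py | dotpad
-- ===== SOURCE A (Python) =====
-- import copy
--
-- def shortlong(tv0, tv1):
--
--     if len(tv0) > len(tv1):
--         shortV = tv1
--         longV = tv0
--     else:
--         shortV = tv0
--         longV = tv1
--
--     vector = []
--
--     vector.append(shortV)
--     vector.extend([len(shortV)])
--     vector.append(longV)
--     vector.extend([len(longV)])
--
--     return vector
--
-- def dotpad(tv0, tv1, n):
--     vector = shortlong(tv0, tv1)
--
--     #slicing only creates a SHALLOW copy
--     copiedV = copy.deepcopy(vector)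
--
--     shortV = copiedV[0]
--     longV = copiedV[2]
--
--     dotP = 0
--
--     for j, elem in enumerate(longV):
--
--         if j >= len(shortV):
--             shortV.extend([n])
--
--         dotP += shortV[j] * longV[j]
--
--     return dotP
-- ===== SOURCE B (Python) =====
-- def dotpad(tv0, tv1, n):
--     m = min(len(tv0), len(tv1))
--     longer = tv0 if len(tv0) > len(tv1) else tv1
--     overlap = sum(tv0[j] * tv1[j] for j in range(m))
--     return overlap + n * sum(longer[m:])
-- ===== Notes on version B (the rewrite author's own statement) =====
-- stated objective: simpler
-- what changed: Replaces A's shortlong packing, deepcopy and a loop that mutates the short vector by appending the pad element per step with a two-pass closed decomposition: overlap dot product over the first min-length indices plus n times the sum of the longer vector's tail; no copying or mutation.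
import Mathlib
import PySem

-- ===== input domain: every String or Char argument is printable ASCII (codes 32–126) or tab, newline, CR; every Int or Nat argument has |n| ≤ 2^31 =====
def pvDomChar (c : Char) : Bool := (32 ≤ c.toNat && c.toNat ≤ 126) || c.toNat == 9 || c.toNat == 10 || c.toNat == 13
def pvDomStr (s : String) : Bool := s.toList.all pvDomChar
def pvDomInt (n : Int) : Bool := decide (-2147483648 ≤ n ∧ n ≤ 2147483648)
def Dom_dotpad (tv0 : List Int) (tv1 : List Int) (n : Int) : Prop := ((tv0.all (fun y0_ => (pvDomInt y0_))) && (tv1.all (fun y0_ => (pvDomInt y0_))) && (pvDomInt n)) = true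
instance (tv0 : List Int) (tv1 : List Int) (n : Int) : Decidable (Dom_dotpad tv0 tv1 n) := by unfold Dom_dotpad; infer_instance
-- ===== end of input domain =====

-- B replaces A's deepcopy + pад-by-mutation loop with overlap dot product + n * (tail sum of the longer vector); return values proved equal, B performs no mutation (A mutates only its own deep copy, so callers see none either).

-- ===== PORT A =====
-- shortlong returns the 4-slot list [shortV, len(shortV), longV, len(longV)] as a tuple (heterogeneous Python list).
def shortlongPort (tv0 : List Int) (tv1 : List Int) : List Int × Int × List Int × Int :=
  if tv0.length > tv1.length then (tv1, (tv1.length : Int), tv0, (tv0.length : Int))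
  else (tv0, (tv0.length : Int), tv1, (tv1.length : Int))

-- the loop body: for j, elem in enumerate(longV): if j >= len(shortV): shortV.extend([n]); dotP += shortV[j]*longV[j]
-- shortV[j] / longV[j] are in range whenever A runs them, so pyGet? is some; .getD 0 only discharges the Option.
def dotpadLoop (n : Int) (longV : List Int) : List (Int × Int) → List Int → Int → Int
  | [], _, dotP => dotP
  | (j, _elem) :: rest, shortV, dotP =>
    let shortV' := if j ≥ (shortV.length : Int) then shortV ++ [n] else shortV
    dotpadLoop n longV rest shortV'
      (dotP + (PySem.List.pyGet? shortV' j).getD 0 * (PySem.List.pyGet? longV j).getD 0)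

def dotpad (tv0 : List Int) (tv1 : List Int) (n : Int) : Int :=
  let vector := shortlongPort tv0 tv1
  -- copy.deepcopy of a list of ints: identity on the value (A then mutates only the copy)
  let copiedV := vector
  let shortV := copiedV.1
  let longV := copiedV.2.2.1
  dotpadLoop n longV (PySem.List.enumerate longV) shortV 0

-- ===== PORT B =====
def dotpad_alt (tv0 : List Int) (tv1 : List Int) (n : Int) : Int :=
  let m := min tv0.length tv1.length
  let longer := if tv0.length > tv1.length then tv0 else tv1
  let overlap := ((List.range m).map (fun j => tv0.getD j 0 * tv1.getD j 0)).sum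
  -- longer[m:] with 0 ≤ m is exactly List.drop m
  overlap + n * (longer.drop m).sum

-- ===== PRECONDITION & SPEC =====
def Spec_dotpad (tv0 : List Int) (tv1 : List Int) (n : Int) (out : Int) : Prop := out = dotpad_alt tv0 tv1 n
instance (tv0 : List Int) (tv1 : List Int) (n : Int) (out : Int) : Decidable (Spec_dotpad tv0 tv1 n out) := by unfold Spec_dotpad; infer_instance

-- ===== CLAIM (what is proved, stated in full; the proofs are below) =====
def Claim_equal_dotpad : Prop := ∀ (tv0 : List Int) (tv1 : List Int) (n : Int), Dom_dotpad tv0 tv1 n → Spec_dotpad tv0 tv1 n (dotpad tv0 tv1 n)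

-- ===== LEMMAS AND PROOFS =====

-- the fully padded short vector
def pvPad (S : List Int) (n : Int) (len : Nat) : List Int := S ++ List.replicate (len - S.length) n

lemma pvPad_getD_lt (S : List Int) (n : Int) (len j : Nat) (h : j < S.length) :
    (pvPad S n len).getD j 0 = S.getD j 0 := by
  simp [pvPad, List.getD, List.getElem?_append_left h]

lemma pvPad_getD_ge (S : List Int) (n : Int) (len j : Nat) (h1 : S.length ≤ j) (h2 : j < len) :
    (pvPad S n len).getD j 0 = n := by
  have hlt : j - S.length < len - S.length := by omega
  simp [pvPad, List.getD, List.getElem?_append_right h1, hlt]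

lemma dotpadLoop_spec (n : Int) (L S : List Int) :
    ∀ (ld : List Int) (k : Nat) (dotP : Int), ld = L.drop k →
    dotpadLoop n L (PySem.List.enumerate ld k) (S ++ List.replicate (k - S.length) n) dotP
      = dotP + ((List.range' k (L.length - k)).map
          (fun j => (pvPad S n L.length).getD j 0 * L.getD j 0)).sum := by
  intro ld
  induction ld with
  | nil =>
    intro k dotP hk
    have hlen : L.length ≤ k := by
      by_contra h
      have := List.drop_eq_nil_iff.mp hk.symm
      omega
    have : L.length - k = 0 := by omega
    simp [PySem.List.enumerate, dotpadLoop, this]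
  | cons x ld ih =>
    intro k dotP hk
    have hklt : k < L.length := by
      by_contra h
      rw [List.drop_eq_nil_of_le (by omega)] at hk
      simp at hk
    have hld : ld = L.drop (k + 1) := by
      have := congrArg (fun l => l.tail) hk
      simpa [List.tail_drop] using this
    rw [PySem.List.enumerate_cons]
    rw [dotpadLoop]
    have hcast : ((k : Int) + 1) = ((k + 1 : Nat) : Int) := by push_cast; ring
    have hrange : List.range' k (L.length - k) =
        k :: List.range' (k + 1) (L.length - (k + 1)) := by
      have h : L.length - k = (L.length - (k + 1)) + 1 := by omega
      rw [h, List.range'_succ]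
    have hcond : ((k : Int) ≥ ((S ++ List.replicate (k - S.length) n).length : Int)) ↔ S.length ≤ k := by
      simp [List.length_append]; omega
    have hget2 : (PySem.List.pyGet? L (k : Int)).getD 0 = L.getD k 0 := by
      simp [PySem.List.pyGet?_natCast, List.getD, List.getElem?_eq_getElem hklt]
    by_cases hks : S.length ≤ k
    · -- pad step: shortV' = S ++ replicate (k+1 - S.length) n
      have hif : (if (k : Int) ≥ ((S ++ List.replicate (k - S.length) n).length : Int)
          then (S ++ List.replicate (k - S.length) n) ++ [n]
          else S ++ List.replicate (k - S.length) n)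
          = S ++ List.replicate (k + 1 - S.length) n := by
        rw [if_pos (hcond.mpr hks)]
        have h : k + 1 - S.length = (k - S.length) + 1 := by omega
        simp [h, List.replicate_succ', List.append_assoc]
      have hget1 : (PySem.List.pyGet? (S ++ List.replicate (k + 1 - S.length) n) (k : Int)).getD 0
          = (pvPad S n L.length).getD k 0 := by
        rw [pvPad_getD_ge S n L.length k hks hklt]
        rw [PySem.List.pyGet?_natCast]
        rw [List.getElem?_append_right hks]
        have hlt : k - S.length < k + 1 - S.length := by omega
        simp [hlt]
      rw [hif, hget1, hget2, hcast, ih (k + 1) _ hld, hrange]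
      simp [List.sum_cons]
      ring
    · -- no pad: k < S.length, both replicate counts are 0
      have hif : (if (k : Int) ≥ ((S ++ List.replicate (k - S.length) n).length : Int)
          then (S ++ List.replicate (k - S.length) n) ++ [n]
          else S ++ List.replicate (k - S.length) n)
          = S ++ List.replicate (k + 1 - S.length) n := by
        rw [if_neg (fun h => hks (hcond.mp h))]
        have h1 : k - S.length = 0 := by omega
        have h2 : k + 1 - S.length = 0 := by omega
        rw [h1, h2]
      have hget1 : (PySem.List.pyGet? (S ++ List.replicate (k + 1 - S.length) n) (k : Int)).getD 0
          = (pvPad S n L.length).getD k 0 := by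
        rw [pvPad_getD_lt S n L.length k (by omega)]
        have h2 : k + 1 - S.length = 0 := by omega
        have hkS : k < S.length := by omega
        simp [h2, PySem.List.pyGet?_natCast, List.getD, List.getElem?_eq_getElem hkS]
      rw [hif, hget1, hget2, hcast, ih (k + 1) _ hld, hrange]
      simp [List.sum_cons]
      ring

lemma sum_range'_getD (L : List Int) :
    ∀ (d k : Nat), d = L.length - k →
    ((List.range' k d).map (fun j => L.getD j 0)).sum = (L.drop k).sum := by
  intro d
  induction d with
  | zero =>
    intro k h
    rw [List.drop_eq_nil_of_le (by omega)]
    simp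
  | succ d ih =>
    intro k h
    have hk : k < L.length := by omega
    rw [List.range'_succ, List.drop_eq_getElem_cons hk]
    simp only [List.map_cons, List.sum_cons]
    rw [ih (k + 1) (by omega)]
    congr 1
    simp [List.getD, List.getElem?_eq_getElem hk]

lemma tail_sum (S L : List Int) (n : Int) (hm : S.length ≤ L.length) :
    ((List.range' S.length (L.length - S.length)).map
        (fun j => (pvPad S n L.length).getD j 0 * L.getD j 0)).sum
      = n * (L.drop S.length).sum := by
  have h1 : ((List.range' S.length (L.length - S.length)).map
        (fun j => (pvPad S n L.length).getD j 0 * L.getD j 0)).sum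
      = ((List.range' S.length (L.length - S.length)).map (fun j => n * L.getD j 0)).sum := by
    congr 1
    apply List.map_congr_left
    intro j hj
    have := List.mem_range'_1.mp hj
    rw [pvPad_getD_ge S n L.length j (by omega) (by omega)]
  rw [h1]
  have h2 : ∀ (l : List Nat), ((l.map (fun j => n * L.getD j 0)).sum
      = n * (l.map (fun j => L.getD j 0)).sum) := by
    intro l
    induction l with
    | nil => simp
    | cons a t iht => simp only [List.map_cons, List.sum_cons, iht]; ring
  rw [h2, sum_range'_getD L (L.length - S.length) S.length rfl]

lemma overlap_sum (S L : List Int) (n : Int) :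
    ((List.range S.length).map
        (fun j => (pvPad S n L.length).getD j 0 * L.getD j 0)).sum
      = ((List.range S.length).map (fun j => S.getD j 0 * L.getD j 0)).sum := by
  congr 1
  apply List.map_congr_left
  intro j hj
  rw [pvPad_getD_lt S n L.length j (List.mem_range.mp hj)]

lemma dotpad_eq_pad_sum (S L : List Int) (n : Int) (hm : S.length ≤ L.length) :
    dotpadLoop n L (PySem.List.enumerate L) S 0
      = ((List.range S.length).map (fun j => S.getD j 0 * L.getD j 0)).sum
        + n * (L.drop S.length).sum := by
  have h0 := dotpadLoop_spec n L S L 0 0 (by simp)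
  simp only [Nat.zero_sub, Nat.sub_zero, List.replicate_zero, List.append_nil, Nat.cast_zero] at h0
  rw [h0]
  have hsplit : List.range' 0 L.length
      = List.range' 0 S.length ++ List.range' S.length (L.length - S.length) := by
    have h := @List.range'_append 0 S.length (L.length - S.length) 1
    simp only [one_mul, zero_add] at h
    rw [h]
    congr 1
    omega
  rw [hsplit, List.map_append, List.sum_append, ← List.range_eq_range',
    overlap_sum S L n, tail_sum S L n hm]
  ring

-- ===== VERDICT (by name: the statement is the Claim_ definition above) =====
theorem dotpad_spec : Claim_equal_dotpad := by
  intro tv0 tv1 n _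
  unfold Spec_dotpad dotpad dotpad_alt shortlongPort
  by_cases h : tv0.length > tv1.length
  · simp only [h, if_pos]
    rw [dotpad_eq_pad_sum tv1 tv0 n (by omega)]
    have hm : min tv0.length tv1.length = tv1.length := by omega
    rw [hm]
    congr 1
    congr 1
    apply List.map_congr_left
    intro j _
    ring
  · simp only [h, if_false]
    rw [dotpad_eq_pad_sum tv0 tv1 n (by omega)]
    have hm : min tv0.length tv1.length = tv0.length := by omega
    rw [hm]
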